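-- pv_equiv track=rewrite | github.com/Taruu/-6205 | main.py | comparisonMatrix
-- ===== SOURCE A (Python) =====
-- def comparisonMatrix(oldMatrixScreen,NewMatrixScreen):
--     """The function accepts the old matrix and the new matrix. Gives a list of actions to fill the screen."""
--     listSetSymbol = [] #setting a single character
--     listSetWorld = [] #word records
--     cursorCount = 0 #Cursor position
--     countSpace = 0 #Number of spaces
--     for row,(rowListOld,rowListNew) in enumerate(zip(oldMatrixScreen,NewMatrixScreen)):
--         if rowListOld!=rowListNew:
--             list_edit = []
--             for col,(Olditem,NewItem) in enumerate(zip(rowListOld,rowListNew)):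
--                 if Olditem != NewItem:
--                     list_edit.append(NewItem)
--                 else:
--                     if len(list_edit) == 1:
--                         countSpace+=list_edit.count(80)
--                         tempPos = cursorCount-1
--                         temp = (tempPos, list_edit[0])
--                         listSetSymbol.append(temp)
--                         list_edit = []
--                     elif len(list_edit) > 1:
--                         countSpace += list_edit.count(80)
--                         tempPos = cursorCount - len(list_edit)
--                         temp = (tempPos, list_edit)
--                         listSetWorld.append(temp)
--                         list_edit = []
--                     else:
--                         pass
--                 cursorCount += 1
--             else:
--                 if len(list_edit) == 1:
--                     countSpace += list_edit.count(80)
--                     tempPos = cursorCount-1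
--                     temp = (tempPos, list_edit[0])
--                     listSetSymbol.append(temp)
--                     list_edit = []
--                 elif len(list_edit) > 1:
--                     countSpace += list_edit.count(80)
--                     tempPos = cursorCount - len(list_edit)
--                     temp = (tempPos, list_edit)
--                     listSetWorld.append(temp)
--                     list_edit = []
--                 else:
--                     pass
--         else:
--             cursorCount += 16
--
--     return listSetSymbol,listSetWorld,countSpace
-- ===== SOURCE B (Python) =====
-- def comparisonMatrix(oldMatrixScreen, NewMatrixScreen):
--     """Group-then-classify rewrite: per changed row, extract the explicit runs of
--     consecutive differing cells, then classify each run in a separate pass."""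
--     listSetSymbol = []
--     listSetWorld = []
--     countSpace = 0
--     base = 0
--     for rowOld, rowNew in zip(oldMatrixScreen, NewMatrixScreen):
--         if rowOld == rowNew:
--             base += 16
--             continue
--         pairs = list(zip(rowOld, rowNew))
--         # pass 1: explicit runs (start column, new values) of consecutive differing cells
--         runs = []
--         i, m = 0, len(pairs)
--         while i < m:
--             if pairs[i][0] == pairs[i][1]:
--                 i += 1
--                 continue
--             j = i
--             while j < m and pairs[j][0] != pairs[j][1]:
--                 j += 1
--             runs.append((i, [n for _, n in pairs[i:j]]))
--             i = j
--         # pass 2: classify the runs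
--         for start, vals in runs:
--             countSpace += vals.count(80)
--             if len(vals) == 1:
--                 listSetSymbol.append((base + start, vals[0]))
--             else:
--                 listSetWorld.append((base + start, vals))
--         base += len(pairs)
--     return listSetSymbol, listSetWorld, countSpace
-- ===== Notes on version B (the rewrite author's own statement) =====
-- stated objective: alternative
-- what changed: Replaces A's single accumulate-and-flush state machine (list_edit flushed both mid-loop and in the for-else) with a two-pass decomposition per changed row: first extract the explicit runs of consecutive differing cells, then classify each run (singleton vs word, counting 80s) in a separate pass.
import Mathlib
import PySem

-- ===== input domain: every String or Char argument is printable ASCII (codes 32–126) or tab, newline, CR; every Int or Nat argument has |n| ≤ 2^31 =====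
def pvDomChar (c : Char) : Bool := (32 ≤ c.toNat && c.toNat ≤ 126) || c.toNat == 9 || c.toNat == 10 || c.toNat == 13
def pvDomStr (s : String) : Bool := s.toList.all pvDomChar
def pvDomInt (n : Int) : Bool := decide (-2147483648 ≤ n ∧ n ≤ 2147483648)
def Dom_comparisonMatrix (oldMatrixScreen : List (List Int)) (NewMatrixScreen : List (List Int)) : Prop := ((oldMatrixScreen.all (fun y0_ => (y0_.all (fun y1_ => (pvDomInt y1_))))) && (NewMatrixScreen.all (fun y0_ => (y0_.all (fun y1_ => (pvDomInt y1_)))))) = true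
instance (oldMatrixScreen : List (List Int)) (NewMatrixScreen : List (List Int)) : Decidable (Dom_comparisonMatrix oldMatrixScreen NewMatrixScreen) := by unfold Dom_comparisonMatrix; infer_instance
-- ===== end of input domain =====

-- B replaces A's accumulate-and-flush diff loop by a per-row group-then-classify
-- decomposition (extract runs of differing cells, then classify them); objective: alternative.

-- ===== PORT A =====
-- flush of A's `list_edit` (the duplicated if/elif/else block of A)
def pvFlushA (syms : List (Int × Int)) (words : List (Int × List Int)) (c space : Int)
    (edit : List Int) : List (Int × Int) × List (Int × List Int) × Int :=
  if edit.length == 1 then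
    (syms ++ [(c - 1, edit.headD 0)], words, space + edit.count 80)
  else if edit.length > 1 then
    (syms, words ++ [(c - edit.length, edit)], space + edit.count 80)
  else
    (syms, words, space)

-- A's inner `for col, (Olditem, NewItem) in enumerate(zip(...))` loop
def pvInnerA : List (Int × Int) → List (Int × Int) → List (Int × List Int) → Int → Int → List Int →
    List (Int × Int) × List (Int × List Int) × Int × Int × List Int
  | [], syms, words, c, space, edit => (syms, words, c, space, edit)
  | (o, n) :: rest, syms, words, c, space, edit =>
    if o ≠ n then
      pvInnerA rest syms words (c + 1) space (edit ++ [n])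
    else
      let f := pvFlushA syms words c space edit
      pvInnerA rest f.1 f.2.1 (c + 1) f.2.2 []

-- A's outer row loop
def pvRowsA : List (List Int × List Int) → List (Int × Int) → List (Int × List Int) → Int → Int →
    List (Int × Int) × List (Int × List Int) × Int
  | [], syms, words, _, space => (syms, words, space)
  | (ro, rn) :: rest, syms, words, c, space =>
    if ro ≠ rn then
      let t := pvInnerA (ro.zip rn) syms words c space []
      -- the for-else flush after the inner loop
      let f := pvFlushA t.1 t.2.1 t.2.2.1 t.2.2.2.1 t.2.2.2.2
      pvRowsA rest f.1 f.2.1 t.2.2.1 f.2.2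
    else
      pvRowsA rest syms words (c + 16) space

def comparisonMatrix (oldMatrixScreen : List (List Int)) (NewMatrixScreen : List (List Int)) : (List (Int × Int)) × (List (Int × List Int)) × Int :=
  pvRowsA (oldMatrixScreen.zip NewMatrixScreen) [] [] 0 0

-- ===== PORT B =====
-- pass 1 of Source B: the runs of consecutive differing cells (start column, new values);
-- Source B's index-scan `while j < m and pairs[j][0] != pairs[j][1]` is the takeWhile/dropWhile below
def pvRunsB : List (Int × Int) → Int → List (Int × List Int)
  | [], _ => []
  | (o, n) :: rest, i =>
    if o = n then pvRunsB rest (i + 1)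
    else
      let run := n :: (rest.takeWhile (fun p => decide (p.1 ≠ p.2))).map Prod.snd
      (i, run) :: pvRunsB (rest.dropWhile (fun p => decide (p.1 ≠ p.2))) (i + run.length)
termination_by l => l.length
decreasing_by
  · simp
  · simpa using Nat.lt_succ_of_le (List.length_dropWhile_le _ _)

-- pass 2 of Source B: classify one run
def pvStepB (st : List (Int × Int) × List (Int × List Int) × Int) (r : Int × List Int) :
    List (Int × Int) × List (Int × List Int) × Int :=
  match r.2 with
  | [v] => (st.1 ++ [(r.1, v)], st.2.1, st.2.2 + r.2.count 80)
  | _ => (st.1, st.2.1 ++ [(r.1, r.2)], st.2.2 + r.2.count 80)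

def pvClassifyB (runs : List (Int × List Int)) (base : Int)
    (syms : List (Int × Int)) (words : List (Int × List Int)) (space : Int) :
    List (Int × Int) × List (Int × List Int) × Int :=
  runs.foldl (fun st r => pvStepB st (base + r.1, r.2)) (syms, words, space)

def pvRowsB : List (List Int × List Int) → List (Int × Int) → List (Int × List Int) → Int → Int →
    List (Int × Int) × List (Int × List Int) × Int
  | [], syms, words, _, space => (syms, words, space)
  | (ro, rn) :: rest, syms, words, base, space =>
    if ro = rn then pvRowsB rest syms words (base + 16) space
    else
      let pairs := ro.zip rn
      let f := pvClassifyB (pvRunsB pairs 0) base syms words space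
      pvRowsB rest f.1 f.2.1 (base + pairs.length) f.2.2

def comparisonMatrix_alt (oldMatrixScreen : List (List Int)) (NewMatrixScreen : List (List Int)) : (List (Int × Int)) × (List (Int × List Int)) × Int :=
  pvRowsB (oldMatrixScreen.zip NewMatrixScreen) [] [] 0 0

-- ===== PRECONDITION & SPEC =====
def Spec_comparisonMatrix (oldMatrixScreen : List (List Int)) (NewMatrixScreen : List (List Int)) (out : (List (Int × Int)) × (List (Int × List Int)) × Int) : Prop := out = comparisonMatrix_alt oldMatrixScreen NewMatrixScreen
instance (oldMatrixScreen : List (List Int)) (NewMatrixScreen : List (List Int)) (out : (List (Int × Int)) × (List (Int × List Int)) × Int) : Decidable (Spec_comparisonMatrix oldMatrixScreen NewMatrixScreen out) := by unfold Spec_comparisonMatrix; infer_instance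

-- ===== CLAIM (what is proved, stated in full; the proofs are below) =====
def Claim_equal_comparisonMatrix : Prop := ∀ (oldMatrixScreen : List (List Int)) (NewMatrixScreen : List (List Int)), Dom_comparisonMatrix oldMatrixScreen NewMatrixScreen → Spec_comparisonMatrix oldMatrixScreen NewMatrixScreen (comparisonMatrix oldMatrixScreen NewMatrixScreen)

-- ===== LEMMAS AND PROOFS =====

-- runs with absolute start positions, following A's accumulate-and-flush structure
def pvRunsFrom (edit : List Int) (c : Int) : List (Int × Int) → List (Int × List Int)
  | [] => if edit = [] then [] else [(c - edit.length, edit)]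
  | (o, n) :: rest =>
    if o = n then
      (if edit = [] then [] else [(c - edit.length, edit)]) ++ pvRunsFrom [] (c + 1) rest
    else
      pvRunsFrom (edit ++ [n]) (c + 1) rest

def pvClassifyAbs (runs : List (Int × List Int))
    (syms : List (Int × Int)) (words : List (Int × List Int)) (space : Int) :
    List (Int × Int) × List (Int × List Int) × Int :=
  runs.foldl pvStepB (syms, words, space)

theorem pvRunsB_shift : ∀ (ps : List (Int × Int)) (i b : Int),
    pvRunsB ps (b + i) = (pvRunsB ps i).map (fun r => (b + r.1, r.2)) := by
  intro ps i
  induction ps, i using pvRunsB.induct with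
  | case1 i => intro b; simp [pvRunsB]
  | case2 n rest i ih =>
    intro b
    simp only [pvRunsB]
    rw [show b + i + 1 = b + (i + 1) by ring]
    exact ih b
  | case3 o n rest i h run ih =>
    intro b
    simp only [pvRunsB, if_neg h]
    rw [show b + i + ((n :: (rest.takeWhile (fun p => decide (p.1 ≠ p.2))).map Prod.snd).length : Int)
          = b + (i + ((n :: (rest.takeWhile (fun p => decide (p.1 ≠ p.2))).map Prod.snd).length : Int)) by ring]
    rw [ih b]
    norm_num [run]

theorem pvRunsFrom_eq (ps : List (Int × Int)) :
    ∀ (edit : List Int) (c : Int),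
      pvRunsFrom edit c ps =
        (if edit = [] then pvRunsB ps c
         else (c - edit.length, edit ++ (ps.takeWhile (fun p => decide (p.1 ≠ p.2))).map Prod.snd)
              :: pvRunsB (ps.dropWhile (fun p => decide (p.1 ≠ p.2)))
                   (c + (ps.takeWhile (fun p => decide (p.1 ≠ p.2))).length)) := by
  induction ps with
  | nil =>
    intro edit c
    by_cases h : edit = [] <;> simp [pvRunsFrom, pvRunsB, h]
  | cons p rest ih =>
    intro edit c
    obtain ⟨o, n⟩ := p
    by_cases hon : o = n
    · by_cases h : edit = []
      · simp [pvRunsFrom, pvRunsB, hon, h, ih]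
      · simp only [pvRunsFrom, if_pos hon, if_neg h, ih [] (c + 1)]
        simp only [List.takeWhile_cons, List.dropWhile_cons]
        simp [pvRunsB, hon]
    · by_cases h : edit = []
      · subst h
        simp only [pvRunsFrom, if_neg hon, List.nil_append]
        rw [ih [n] (c + 1), if_neg (List.cons_ne_nil n [])]
        simp only [pvRunsB, if_neg hon, List.takeWhile_cons, List.dropWhile_cons]
        simp [hon]
        congr 1
        ring
      · simp only [pvRunsFrom, if_neg hon, ih (edit ++ [n]) (c + 1),
          if_neg (by simp : ¬(edit ++ [n] = [])), if_neg h]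
        simp only [pvRunsB, if_neg hon, List.takeWhile_cons, List.dropWhile_cons]
        simp [hon]
        congr 1
        ring

theorem pvFlushA_eq (syms : List (Int × Int)) (words : List (Int × List Int)) (c space : Int)
    (edit : List Int) :
    pvFlushA syms words c space edit =
      pvClassifyAbs (if edit = [] then [] else [(c - edit.length, edit)]) syms words space := by
  match edit with
  | [] => simp [pvFlushA, pvClassifyAbs]
  | [v] => simp [pvFlushA, pvClassifyAbs, pvStepB]
  | v :: w :: es => simp [pvFlushA, pvClassifyAbs, pvStepB]

theorem pvInnerA_cursor (ps : List (Int × Int)) :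
    ∀ syms words c space edit,
      (pvInnerA ps syms words c space edit).2.2.1 = c + ps.length := by
  induction ps with
  | nil => intro _ _ _ _ _; simp [pvInnerA]
  | cons p rest ih =>
    intro syms words c space edit
    obtain ⟨o, n⟩ := p
    by_cases h : o = n <;> simp [pvInnerA, h, ih] <;> ring

theorem pvInnerA_flush (ps : List (Int × Int)) :
    ∀ syms words c space edit,
      (let t := pvInnerA ps syms words c space edit
       pvFlushA t.1 t.2.1 t.2.2.1 t.2.2.2.1 t.2.2.2.2) =
        pvClassifyAbs (pvRunsFrom edit c ps) syms words space := by
  induction ps with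
  | nil =>
    intro syms words c space edit
    simp only [pvInnerA, pvRunsFrom]
    exact pvFlushA_eq syms words c space edit
  | cons p rest ih =>
    intro syms words c space edit
    obtain ⟨o, n⟩ := p
    by_cases h : o = n
    · simp only [pvInnerA, if_neg (fun hc : o ≠ n => hc h), pvRunsFrom, if_pos h]
      rw [ih]
      rw [pvFlushA_eq]
      simp only [pvClassifyAbs, List.foldl_append]
    · simp only [pvInnerA, if_pos h, pvRunsFrom, if_neg h]
      rw [ih]

theorem pvRows_eq (rows : List (List Int × List Int)) :
    ∀ syms words c space,
      pvRowsA rows syms words c space = pvRowsB rows syms words c space := by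
  induction rows with
  | nil => intro _ _ _ _; rfl
  | cons r rest ih =>
    intro syms words c space
    obtain ⟨ro, rn⟩ := r
    by_cases h : ro = rn
    · simp only [pvRowsA, if_neg (fun hc : ro ≠ rn => hc h), pvRowsB, if_pos h]
      exact ih _ _ _ _
    · simp only [pvRowsA, if_pos h, pvRowsB, if_neg h]
      have hc := pvInnerA_cursor (ro.zip rn) syms words c space []
      have hf := pvInnerA_flush (ro.zip rn) syms words c space []
      simp only at hf
      rw [hf, hc]
      have hb : pvClassifyB (pvRunsB (ro.zip rn) 0) c syms words space =
          pvClassifyAbs (pvRunsFrom [] c (ro.zip rn)) syms words space := by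
        rw [pvRunsFrom_eq, if_pos rfl]
        rw [show (c : Int) = c + 0 by ring, pvRunsB_shift]
        rw [pvClassifyB, pvClassifyAbs, List.foldl_map]
        simp
      rw [← hb, ih]

-- ===== VERDICT (by name: the statement is the Claim_ definition above) =====
theorem comparisonMatrix_spec : Claim_equal_comparisonMatrix := by
  intro old new _
  unfold Spec_comparisonMatrix comparisonMatrix comparisonMatrix_alt
  exact pvRows_eq (old.zip new) [] [] 0 0
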